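/- GENERATED by c/gen_decode.py: decode facts of the image, one per distinct instruction byte string. -/
import UserX.DecodeImage

#decode_all ProgX.Base.Dec
  "4138d7"  -- cmp r15b,dl
  "4839d8"  -- cmp rax,rbx
  "4889142560f01f00"  -- mov QWORD PTR ds:0x1ff060,rdx
  "488b042500008000"  -- mov rax,QWORD PTR ds:0x800000
  "48c7042528f01f0001000000"  -- mov QWORD PTR ds:0x1ff028,0x1
  "49c1e903"  -- shr r9,0x3
  "5b"  -- pop rbx
  "660fefc9"  -- pxor xmm1,xmm1
  "741d"  -- je 1024e3
  "7725"  -- ja 102d22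
  "83f801"  -- cmp eax,0x1
  "be02000000"  -- mov esi,0x2
  "e861fcffff"  -- call 100059
  "e8d6f5ffff"  -- call 102440
  "eb32"  -- jmp 101252
  "f20f1015e4e10300"  -- movsd xmm2,QWORD PTR [rip+0x3e1e4]
  "f20f590424"  -- mulsd xmm0,QWORD PTR [rsp]
  "f20f5cce"  -- subsd xmm1,xmm6
  "f20f5ed0"  -- divsd xmm2,xmm0
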